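-- pv_equiv track=rewrite | github.com/VuBui217/dailycodingchallenge | 2026/april/palindrome_characters.py | palindrome_locator
-- ===== SOURCE A (Python) =====
-- def palindrome_locator(s):
--     # Check for palindrome
--     # if s != s[::-1]:
--     #     return "none"
--     l = 0
--     r = len(s) - 1
--     while l < r:
--         if s[l] != s[r]:
--             return "none"
--         l += 1
--         r -= 1
--
--     mid = len(s) // 2
--     return s[mid] if len(s) % 2 == 1 else s[mid-1:mid+1]
-- ===== SOURCE B (Python) =====
-- def palindrome_locator(s):
--     if s != s[::-1]:
--         return "none"
--     n = len(s)
--     return s[(n - 1) // 2 : n // 2 + 1]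
-- ===== Notes on version B (the rewrite author's own statement) =====
-- stated objective: simpler
-- what changed: B replaces the two-pointer early-exit scan by a whole-string reversal comparison (s == s[::-1]) and collapses the odd/even middle extraction into the single slice s[(n-1)//2 : n//2+1].
import Mathlib
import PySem

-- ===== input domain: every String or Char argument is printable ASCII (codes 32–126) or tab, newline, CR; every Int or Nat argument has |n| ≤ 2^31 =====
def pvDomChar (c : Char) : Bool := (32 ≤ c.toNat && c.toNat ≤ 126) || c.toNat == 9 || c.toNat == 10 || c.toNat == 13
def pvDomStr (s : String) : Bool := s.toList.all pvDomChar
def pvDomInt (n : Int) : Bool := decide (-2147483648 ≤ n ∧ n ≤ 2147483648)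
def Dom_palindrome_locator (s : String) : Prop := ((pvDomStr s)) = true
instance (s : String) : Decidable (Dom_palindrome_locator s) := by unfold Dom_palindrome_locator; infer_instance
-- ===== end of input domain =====

-- B checks the palindrome by whole-string reversal instead of A's two-pointer scan and
-- extracts the middle with a single slice; same return value, no speed claim.

-- ===== PORT A =====
-- A's while loop: two pointers moving inward; returns false where A returns "none"
def pvLoopA (cs : List Char) (l r : Nat) : Bool :=
  if l < r then
    if cs[l]? ≠ cs[r]? then false
    else pvLoopA cs (l + 1) (r - 1)
  else true
termination_by r - l

def palindrome_locator (s : String) : String :=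
  let cs := s.toList
  let n := cs.length
  if pvLoopA cs 0 (n - 1) = false then "none"
  else
    let mid := n / 2
    if n % 2 = 1 then String.ofList [PySem.List.pyGetD cs (mid : Int) ' ']
    else String.ofList (PySem.List.slice cs (some ((mid : Int) - 1)) (some ((mid : Int) + 1)))

-- ===== PORT B =====
def palindrome_locator_alt (s : String) : String :=
  let cs := s.toList
  if cs ≠ cs.reverse then "none"   -- s != s[::-1], via PySem.List.slice?_none_none_neg_one
  else
    let n := cs.length
    String.ofList (PySem.List.slice cs (some (PySem.Int.floordiv ((n : Int) - 1) 2)) (some ((n : Int) / 2 + 1)))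

-- ===== PRECONDITION & SPEC =====
def Spec_palindrome_locator (s : String) (out : String) : Prop := out = palindrome_locator_alt s
instance (s : String) (out : String) : Decidable (Spec_palindrome_locator s out) := by unfold Spec_palindrome_locator; infer_instance

-- ===== CLAIM (what is proved, stated in full; the proofs are below) =====
def Claim_equal_palindrome_locator : Prop := ∀ (s : String), Dom_palindrome_locator s → Spec_palindrome_locator s (palindrome_locator s)

-- ===== LEMMAS AND PROOFS =====

-- A's loop is true iff each visited pair matches
theorem pvLoopA_iff (cs : List Char) :
    ∀ k l r, r - l = k → (pvLoopA cs l r = true ↔ ∀ i, l ≤ i → i ≤ r → cs[i]? = cs[l + r - i]?) := by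
  intro k
  induction k using Nat.strong_induction_on with
  | _ k ih =>
    intro l r hk
    rw [pvLoopA]
    by_cases hlr : l < r
    · rw [if_pos hlr]
      by_cases h : cs[l]? = cs[r]?
      · rw [if_neg (by simp [h]), ih (r - 1 - (l + 1)) (by omega) (l + 1) (r - 1) rfl]
        constructor
        · intro hall i hli hir
          by_cases hil : i = l
          · subst hil; simpa using h
          · by_cases hir' : i = r
            · rw [hir', show l + r - r = l by omega]; exact h.symm
            · have := hall i (by omega) (by omega)
              rwa [show l + 1 + (r - 1) - i = l + r - i by omega] at this
        · intro hall i hli hir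
          rw [show l + 1 + (r - 1) - i = l + r - i by omega]
          exact hall i (by omega) (by omega)
      · rw [if_pos (by simp [h])]
        constructor
        · intro hf; exact absurd hf (by simp)
        · intro hall
          exact absurd (by simpa using hall l le_rfl (by omega)) h
    · rw [if_neg hlr]
      simp only [true_iff]
      intro i hli hir
      rw [show l + r - i = i by omega]

theorem pvLoopA_main (cs : List Char) :
    pvLoopA cs 0 (cs.length - 1) = true ↔ cs = cs.reverse := by
  rw [pvLoopA_iff cs (cs.length - 1) 0 (cs.length - 1) rfl]
  constructor
  · intro hall
    apply List.ext_getElem?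
    intro i
    by_cases hi : i < cs.length
    · rw [List.getElem?_reverse hi]
      simpa using hall i (Nat.zero_le _) (by omega)
    · rw [List.getElem?_eq_none (by omega), List.getElem?_eq_none (by simp; omega)]
  · intro hpal i _ hir
    by_cases hn : cs.length = 0
    · simp [hn]
    · have hi : i < cs.length := by omega
      have h2 := List.getElem?_reverse hi (l := cs)
      rw [← hpal] at h2
      rw [show 0 + (cs.length - 1) - i = cs.length - 1 - i by omega]
      exact h2

-- the two middle extractions agree
theorem tails_eq (cs : List Char) :
    (if cs.length % 2 = 1 then String.ofList [PySem.List.pyGetD cs ((cs.length / 2 : Nat) : Int) ' ']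
     else String.ofList (PySem.List.slice cs (some (((cs.length / 2 : Nat) : Int) - 1)) (some (((cs.length / 2 : Nat) : Int) + 1))))
    = String.ofList (PySem.List.slice cs (some (PySem.Int.floordiv ((cs.length : Int) - 1) 2)) (some ((cs.length : Int) / 2 + 1))) := by
  set n := cs.length with hn
  by_cases hodd : n % 2 = 1
  · have hmid : n / 2 < n := by omega
    have hfd : PySem.Int.floordiv ((n : Int) - 1) 2 = ((n / 2 : Nat) : Int) := by
      rw [PySem.Int.floordiv_eq_ediv_of_pos (by omega)]; omega
    have hdiv : ((n : Int) / 2 + 1) = ((n / 2 + 1 : Nat) : Int) := by omega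
    rw [if_pos hodd, hfd, hdiv, PySem.List.slice_natCast]
    congr 1
    rw [List.drop_eq_getElem_cons hmid,
      show n / 2 + 1 - n / 2 = 1 by omega, List.take_succ_cons, List.take_zero]
    rw [PySem.List.pyGetD_natCast, List.getD_eq_getElem _ _ hmid]
  · rw [if_neg hodd]
    rcases Nat.eq_zero_or_pos n with h0 | hpos
    · have hcs : cs = [] := List.length_eq_zero_iff.mp (by omega)
      rw [hcs]
      simp [PySem.List.slice]
    · have hfd : PySem.Int.floordiv ((n : Int) - 1) 2 = ((n / 2 : Nat) : Int) - 1 := by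
        rw [PySem.Int.floordiv_eq_ediv_of_pos (by omega)]; omega
      have e3 : ((n : Int) / 2 + 1) = ((n / 2 : Nat) : Int) + 1 := by omega
      rw [hfd, e3]

-- ===== VERDICT (by name: the statement is the Claim_ definition above) =====
theorem palindrome_locator_spec : Claim_equal_palindrome_locator := by
  intro s _
  show palindrome_locator s = palindrome_locator_alt s
  unfold palindrome_locator palindrome_locator_alt
  have h1 : (pvLoopA s.toList 0 (s.toList.length - 1) = false) ↔ s.toList ≠ s.toList.reverse := by
    rw [ne_eq, ← pvLoopA_main]
    cases pvLoopA s.toList 0 (s.toList.length - 1) <;> simp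
  simp only [h1]
  split_ifs with h h2
  · rfl
  · have h3 := tails_eq s.toList
    rw [if_pos h2] at h3
    exact h3
  · have h3 := tails_eq s.toList
    rw [if_neg h2] at h3
    exact h3
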